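-- pv_equiv track=rewrite | github.com/shashankreddy999/proj2 | task7a.py | task7a
-- ===== SOURCE A (Python) =====
-- def task7a(arr, h,kk):
--     m = len(arr)
--     n = len(arr[0])
--     res_x, res_y = 0, 0
--     b, r = 0,0
--
--     dp = [[0] * (n + 1) for i in range(m+1)]
--
--     for i in range(1, m+1):
--         for j in range(1, n+1):
--
--             if arr[i-1][j-1] >= h:
--                 dp[i][j] = dp[i][j-1] + dp[i-1][j] - dp[i-1][j-1] + 1
--             else:
--                 dp[i][j] = dp[i][j-1] + dp[i-1][j] - dp[i-1][j-1]
--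
--
--     max_size = 0
--     for i in range(1, m+1):
--         for j in range(1, n+1):
--             k = 0
--             while i + k < m+1 and j + k < n+1:
--                 v = dp[i+k][j+k] - dp[i+k][j-1] - dp[i-1][j+k] + dp[i-1][j-1]
--                 no = pow((k+1),2) - v
--
--                 if no > kk:
--                     pass
--                 else:
--                     if max_size >= pow((k+1),2):
--                         pass
--                     else:
--                         res_x,res_y = i, j
--                         b,r = i+k, j+k
--                         max_size = pow((k+1),2)
--                 k += 1
--     return res_x,res_y,b,r
-- ===== SOURCE B (Python) =====
-- def task7a(arr, h, kk):
--     m = len(arr)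
--     n = len(arr[0])
--     # prefix sums of the number of cells BELOW h
--     pre = [[0] * (n + 1) for _ in range(m + 1)]
--     for i in range(1, m + 1):
--         row = arr[i - 1]
--         for j in range(1, n + 1):
--             pre[i][j] = pre[i][j - 1] + pre[i - 1][j] - pre[i - 1][j - 1] + (1 if row[j - 1] < h else 0)
--
--     def bad(i, j, s):
--         # number of cells below h in the s x s square with 1-based top-left (i, j)
--         return pre[i + s - 1][j + s - 1] - pre[i + s - 1][j - 1] - pre[i - 1][j + s - 1] + pre[i - 1][j - 1]
--
--     best = 0
--     ans = (0, 0, 0, 0)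
--     for i in range(1, m + 1):
--         for j in range(1, n + 1):
--             lim = min(m - i + 1, n - j + 1)
--             if lim <= best or bad(i, j, best + 1) > kk:
--                 continue  # this cell cannot beat the current best
--             lo, hi = best + 1, lim  # bad() is monotone in s: binary search the largest feasible s
--             while lo < hi:
--                 mid = (lo + hi + 1) // 2
--                 if bad(i, j, mid) <= kk:
--                     lo = mid
--                 else:
--                     hi = mid - 1
--             best = lo
--             ans = (i, j, i + lo - 1, j + lo - 1)
--     return ans
-- ===== Notes on version B (the rewrite author's own statement) =====
-- stated objective: faster
-- what changed: Instead of scanning every square size k at every cell (O(mn*min(m,n))), B keeps a prefix-sum table of cells below the threshold and, per cell, first tests in O(1) whether the current best can be beaten and then binary-searches the largest feasible square side, giving O(mn*log(min(m,n))).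
import Mathlib
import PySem

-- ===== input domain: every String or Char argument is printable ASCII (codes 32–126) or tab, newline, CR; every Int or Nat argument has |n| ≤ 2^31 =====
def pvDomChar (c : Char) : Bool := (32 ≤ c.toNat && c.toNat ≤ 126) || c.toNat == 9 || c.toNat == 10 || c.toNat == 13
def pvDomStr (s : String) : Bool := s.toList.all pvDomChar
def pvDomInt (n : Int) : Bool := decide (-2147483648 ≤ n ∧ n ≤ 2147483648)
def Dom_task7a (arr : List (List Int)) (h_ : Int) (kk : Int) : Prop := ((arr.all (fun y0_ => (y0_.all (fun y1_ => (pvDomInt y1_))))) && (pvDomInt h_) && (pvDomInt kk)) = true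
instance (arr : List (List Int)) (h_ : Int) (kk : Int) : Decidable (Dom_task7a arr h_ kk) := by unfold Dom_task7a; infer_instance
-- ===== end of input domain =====

-- B replaces A's per-cell linear scan over all square sizes by a prefix-sum table of
-- below-threshold cells plus a per-cell binary search for the largest feasible side (faster).


-- ===== PORT A =====
-- shared 2-D indexing primitives (Python's g[i][j] read / write on nonnegative in-range indices)
def pvGet2 (g : List (List Int)) (i j : Int) : Int := (g.getD i.toNat []).getD j.toNat 0
def pvSet2 (g : List (List Int)) (i j v : Int) : List (List Int) :=
  g.set i.toNat ((g.getD i.toNat []).set j.toNat v)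

def task7a (arr : List (List Int)) (h_ : Int) (kk : Int) : Int × Int × Int × Int :=
  let m : Int := arr.length
  let n : Int := (arr.headD []).length
  let dp : List (List Int) :=
    (PySem.List.pyRange 1 (m+1) 1).foldl (fun dp i =>
      (PySem.List.pyRange 1 (n+1) 1).foldl (fun dp j =>
        if (arr.getD (i-1).toNat []).getD (j-1).toNat 0 ≥ h_ then
          pvSet2 dp i j (pvGet2 dp i (j-1) + pvGet2 dp (i-1) j - pvGet2 dp (i-1) (j-1) + 1)
        else
          pvSet2 dp i j (pvGet2 dp i (j-1) + pvGet2 dp (i-1) j - pvGet2 dp (i-1) (j-1))) dp)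
      (List.replicate (m+1).toNat (List.replicate (n+1).toNat 0))
  let fin :=
    (PySem.List.pyRange 1 (m+1) 1).foldl (fun st i =>
      (PySem.List.pyRange 1 (n+1) 1).foldl (fun st j =>
        -- 'while i+k < m+1 and j+k < n+1' with k = 0,1,2,… : exactly min(m+1-i, n+1-j) iterations
        (PySem.List.pyRange 0 (min (m+1-i) (n+1-j)) 1).foldl (fun st k =>
          let v := pvGet2 dp (i+k) (j+k) - pvGet2 dp (i+k) (j-1) - pvGet2 dp (i-1) (j+k) + pvGet2 dp (i-1) (j-1)
          let no := (k+1)^2 - v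
          if no > kk then st
          else if st.2.2.2.2 ≥ (k+1)^2 then st
          else (i, j, i+k, j+k, (k+1)^2)) st) st)
      ((0:Int), (0:Int), (0:Int), (0:Int), (0:Int))
  (fin.1, fin.2.1, fin.2.2.1, fin.2.2.2.1)

-- ===== PORT B =====
def pvBad (pre : List (List Int)) (i j s : Int) : Int :=
  pvGet2 pre (i+s-1) (j+s-1) - pvGet2 pre (i+s-1) (j-1) - pvGet2 pre (i-1) (j+s-1) + pvGet2 pre (i-1) (j-1)

def pvBS (pre : List (List Int)) (kk i j lo hi : Int) : Int :=
  if _h : lo < hi then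
    if pvBad pre i j (PySem.Int.floordiv (lo+hi+1) 2) ≤ kk then
      pvBS pre kk i j (PySem.Int.floordiv (lo+hi+1) 2) hi
    else
      pvBS pre kk i j lo (PySem.Int.floordiv (lo+hi+1) 2 - 1)
  else lo
termination_by (hi - lo).toNat
decreasing_by
  all_goals rw [PySem.Int.floordiv_eq_ediv_of_pos (by norm_num)]; omega

def task7a_alt (arr : List (List Int)) (h_ : Int) (kk : Int) : Int × Int × Int × Int :=
  let m : Int := arr.length
  let n : Int := (arr.headD []).length
  let pre : List (List Int) :=
    (PySem.List.pyRange 1 (m+1) 1).foldl (fun g i =>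
      (PySem.List.pyRange 1 (n+1) 1).foldl (fun g j =>
        pvSet2 g i j (pvGet2 g i (j-1) + pvGet2 g (i-1) j - pvGet2 g (i-1) (j-1) +
          (if (arr.getD (i-1).toNat []).getD (j-1).toNat 0 < h_ then 1 else 0))) g)
      (List.replicate (m+1).toNat (List.replicate (n+1).toNat 0))
  let fin :=
    (PySem.List.pyRange 1 (m+1) 1).foldl (fun st i =>
      (PySem.List.pyRange 1 (n+1) 1).foldl (fun st j =>
        let lim := min (m-i+1) (n-j+1)
        if lim ≤ st.2 then st
        else if pvBad pre i j (st.2+1) > kk then st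
        else
          let lo := pvBS pre kk i j (st.2+1) lim
          ((i, j, i+lo-1, j+lo-1), lo)) st)
      (((0:Int), (0:Int), (0:Int), (0:Int)), (0:Int))
  fin.1

-- ===== PRECONDITION & SPEC =====
-- Pre_ excludes exactly the inputs where the Python raises (IndexError): the empty outer
-- list (arr[0]) and rows shorter than the first row (arr[i-1][j-1] out of range).
def Pre_task7a (arr : List (List Int)) (h_ : Int) (kk : Int) : Prop :=
  arr ≠ [] ∧ ∀ row ∈ arr, (arr.headD []).length ≤ row.length
instance (arr : List (List Int)) (h_ : Int) (kk : Int) : Decidable (Pre_task7a arr h_ kk) := by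
  unfold Pre_task7a; infer_instance
def pvWitness_task7a : List (List Int) × Int × Int := ([[1, 2], [3, 4]], 2, 1)

def Spec_task7a (arr : List (List Int)) (h_ : Int) (kk : Int) (out : Int × Int × Int × Int) : Prop := out = task7a_alt arr h_ kk
instance (arr : List (List Int)) (h_ : Int) (kk : Int) (out : Int × Int × Int × Int) : Decidable (Spec_task7a arr h_ kk out) := by unfold Spec_task7a; infer_instance

-- ===== CLAIM (what is proved, stated in full; the proofs are below) =====
def Claim_equal_task7a : Prop := ∀ (arr : List (List Int)) (h_ : Int) (kk : Int), Dom_task7a arr h_ kk → Pre_task7a arr h_ kk → Spec_task7a arr h_ kk (task7a arr h_ kk)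

-- ===== LEMMAS AND PROOFS =====

-- Nat-index views of the 2-D primitives
def g2 (g : List (List Int)) (i j : Nat) : Int := (g.getD i []).getD j 0
def ps2 (g : List (List Int)) (i j : Nat) (v : Int) : List (List Int) :=
  g.set i ((g.getD i []).set j v)

theorem pvGet2_nat (g : List (List Int)) (i j : Nat) : pvGet2 g (i : Int) (j : Int) = g2 g i j := by
  simp [pvGet2, g2]

theorem g2_ps2_same (g : List (List Int)) (i j : Nat) (v : Int)
    (hi : i < g.length) (hj : j < (g.getD i []).length) :
    g2 (ps2 g i j v) i j = v := by
  simp [g2, ps2, List.getD, List.getElem?_set_self', hi]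
  simp [List.getD, List.getElem?_eq_getElem hi] at hj
  rw [List.getElem?_eq_getElem (by simpa [List.getElem?_eq_getElem hi] using hj)]
  simp [Function.const]

theorem g2_ps2_ne (g : List (List Int)) (i j a b : Nat) (v : Int)
    (h : ¬(a = i ∧ b = j)) : g2 (ps2 g i j v) a b = g2 g a b := by
  by_cases hai : a = i
  · subst hai
    have hbj : b ≠ j := fun hb => h ⟨rfl, hb⟩
    by_cases ha : a < g.length
    · simp [g2, ps2, List.getD, ha, List.getElem?_set_ne (by omega : j ≠ b)]
    · simp [g2, ps2, List.getD, List.set_eq_of_length_le (by omega : g.length ≤ a)]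
  · simp [g2, ps2, List.getD, List.getElem?_set_ne (by omega : i ≠ a)]

-- prefix sums
def Ppre (F : Nat → Nat → Int) (i j : Nat) : Int :=
  ∑ a ∈ Finset.range i, ∑ b ∈ Finset.range j, F a b

theorem Ppre_succ_succ (F : Nat → Nat → Int) (i j : Nat) :
    Ppre F (i+1) (j+1) = Ppre F (i+1) j + Ppre F i (j+1) - Ppre F i j + F i j := by
  simp [Ppre, Finset.sum_range_succ, Finset.sum_add_distrib]; ring

def rect (F : Nat → Nat → Int) (p1 p2 q1 q2 : Nat) : Int :=
  ∑ a ∈ Finset.Ico p1 p2, ∑ b ∈ Finset.Ico q1 q2, F a b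

theorem rect_eq_Ppre (F : Nat → Nat → Int) (p1 p2 q1 q2 : Nat) (hp : p1 ≤ p2) (hq : q1 ≤ q2) :
    rect F p1 p2 q1 q2 = Ppre F p2 q2 - Ppre F p2 q1 - Ppre F p1 q2 + Ppre F p1 q1 := by
  unfold rect Ppre
  have hrow : ∀ a, ∑ b ∈ Finset.Ico q1 q2, F a b
      = (∑ b ∈ Finset.range q2, F a b) - ∑ b ∈ Finset.range q1, F a b := by
    intro a; rw [Finset.sum_Ico_eq_sub _ hq]
  simp only [hrow, Finset.sum_sub_distrib]
  rw [Finset.sum_Ico_eq_sub _ hp, Finset.sum_Ico_eq_sub _ hp]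
  ring

theorem rect_mono (F : Nat → Nat → Int) (h0 : ∀ a b, 0 ≤ F a b) (p1 q1 p2 q2 p2' q2' : Nat)
    (hp : p2 ≤ p2') (hq : q2 ≤ q2') :
    rect F p1 p2 q1 q2 ≤ rect F p1 p2' q1 q2' := by
  unfold rect
  calc ∑ a ∈ Finset.Ico p1 p2, ∑ b ∈ Finset.Ico q1 q2, F a b
      ≤ ∑ a ∈ Finset.Ico p1 p2, ∑ b ∈ Finset.Ico q1 q2', F a b := by
        refine Finset.sum_le_sum fun a _ => ?_
        exact Finset.sum_le_sum_of_subset_of_nonneg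
          (Finset.Ico_subset_Ico le_rfl hq) (fun b _ _ => h0 a b)
    _ ≤ ∑ a ∈ Finset.Ico p1 p2', ∑ b ∈ Finset.Ico q1 q2', F a b := by
        refine Finset.sum_le_sum_of_subset_of_nonneg (Finset.Ico_subset_Ico le_rfl hp) ?_
        exact fun a _ _ => Finset.sum_nonneg fun b _ => h0 a b

theorem rect_add (F G : Nat → Nat → Int) (p1 p2 q1 q2 : Nat) :
    rect (fun a b => F a b + G a b) p1 p2 q1 q2 = rect F p1 p2 q1 q2 + rect G p1 p2 q1 q2 := by
  simp [rect, Finset.sum_add_distrib]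

theorem rect_ones (p1 q1 s : Nat) :
    rect (fun _ _ => (1:Int)) p1 (p1+s) q1 (q1+s) = (s:Int)^2 := by
  simp [rect, Nat.Ico_eq_range']
  push_cast; ring

-- the two 0/1 indicator fields
def fge (arr : List (List Int)) (h_ : Int) (a b : Nat) : Int :=
  if h_ ≤ (arr.getD a []).getD b 0 then 1 else 0
def flt (arr : List (List Int)) (h_ : Int) (a b : Nat) : Int :=
  if (arr.getD a []).getD b 0 < h_ then 1 else 0

theorem flt_nonneg (arr : List (List Int)) (h_ : Int) (a b : Nat) : 0 ≤ flt arr h_ a b := by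
  unfold flt; split <;> norm_num

theorem fge_add_flt (arr : List (List Int)) (h_ : Int) (a b : Nat) :
    fge arr h_ a b + flt arr h_ a b = 1 := by
  unfold fge flt; split <;> split <;> omega

-- the generic grid builder both ports' first phase instantiates
def gridBuild (f : Int → Int → Int) (M N : Nat) : List (List Int) :=
  (PySem.List.pyRange 1 ((M:Int)+1) 1).foldl (fun g i =>
    (PySem.List.pyRange 1 ((N:Int)+1) 1).foldl (fun g j =>
      pvSet2 g i j (pvGet2 g i (j-1) + pvGet2 g (i-1) j - pvGet2 g (i-1) (j-1) + f i j)) g)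
    (List.replicate (M+1) (List.replicate (N+1) (0:Int)))

def cellStep (f : Int → Int → Int) (g : List (List Int)) (i j : Int) : List (List Int) :=
  pvSet2 g i j (pvGet2 g i (j-1) + pvGet2 g (i-1) j - pvGet2 g (i-1) (j-1) + f i j)

theorem gridBuild_eq (f : Int → Int → Int) (M N : Nat) :
    gridBuild f M N = (List.range M).foldl (fun g (t : Nat) =>
      (List.range N).foldl (fun g (c : Nat) => cellStep f g (1+(t:Int)) (1+(c:Int))) g)
      (List.replicate (M+1) (List.replicate (N+1) (0:Int))) := by
  unfold gridBuild cellStep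
  rw [PySem.List.pyRange_one]
  simp only [PySem.List.pyRange_one, add_sub_cancel_right, add_sub_cancel_left,
    Int.toNat_natCast, List.foldl_map]

def GridLen (M N : Nat) (g : List (List Int)) : Prop :=
  g.length = M+1 ∧ ∀ r ∈ g, r.length = N+1

theorem row_len {M N : Nat} {g : List (List Int)} (h : GridLen M N g) (i : Nat) (hi : i ≤ M) :
    (g.getD i []).length = N+1 := by
  have hil : i < g.length := by rw [h.1]; omega
  rw [List.getD_eq_getElem?_getD, List.getElem?_eq_getElem hil]
  exact h.2 _ (List.getElem_mem hil)

theorem GridLen_ps2 {M N : Nat} {g : List (List Int)} (h : GridLen M N g) (i j : Nat)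
    (hi : i ≤ M) (v : Int) : GridLen M N (ps2 g i j v) := by
  refine ⟨by simp [ps2, h.1], fun r hr => ?_⟩
  rcases List.mem_or_eq_of_mem_set hr with hmem | rfl
  · exact h.2 _ hmem
  · rw [List.length_set]
    simpa [List.getD_eq_getElem?_getD] using row_len h i hi

def ColInv (F : Nat → Nat → Int) (M N r c : Nat) (g : List (List Int)) : Prop :=
  GridLen M N g ∧ ∀ a b : Nat, a ≤ M → b ≤ N →
    g2 g a b = if a ≤ r ∨ (a = r+1 ∧ b ≤ c) then Ppre F a b else 0

theorem colstep (f : Int → Int → Int) (M N r c : Nat) (g : List (List Int))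
    (hr : r < M) (hc : c < N)
    (h : ColInv (fun p q => f ((p:Int)+1) ((q:Int)+1)) M N r c g) :
    ColInv (fun p q => f ((p:Int)+1) ((q:Int)+1)) M N r (c+1)
      (cellStep f g (1+(r:Int)) (1+(c:Int))) := by
  set F : Nat → Nat → Int := fun p q => f ((p:Int)+1) ((q:Int)+1) with hF
  have hcast1 : (1 + (r:Int)) = ((r+1 : Nat) : Int) := by push_cast; ring
  have hcast2 : (1 + (c:Int)) = ((c+1 : Nat) : Int) := by push_cast; ring
  have hstep : cellStep f g (1+(r:Int)) (1+(c:Int))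
      = ps2 g (r+1) (c+1) (g2 g (r+1) c + g2 g r (c+1) - g2 g r c + F r c) := by
    unfold cellStep
    rw [hcast1, hcast2]
    have e1 : ((r+1 : Nat) : Int) - 1 = ((r : Nat) : Int) := by push_cast; ring
    have e2 : ((c+1 : Nat) : Int) - 1 = ((c : Nat) : Int) := by push_cast; ring
    rw [e1, e2]
    show pvSet2 _ _ _ _ = _
    simp only [pvSet2, pvGet2, Int.toNat_natCast, ps2, g2, hF]
    push_cast
    ring_nf
  rw [hstep]
  have hval : g2 g (r+1) c + g2 g r (c+1) - g2 g r c + F r c = Ppre F (r+1) (c+1) := by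
    rw [h.2 (r+1) c (by omega) (by omega), h.2 r (c+1) (by omega) (by omega),
      h.2 r c (by omega) (by omega)]
    rw [if_pos (by omega), if_pos (by omega), if_pos (by omega), Ppre_succ_succ]
  refine ⟨GridLen_ps2 h.1 _ _ (by omega) _, fun a b ha hb => ?_⟩
  by_cases hab : a = r+1 ∧ b = c+1
  · obtain ⟨rfl, rfl⟩ := hab
    rw [g2_ps2_same _ _ _ _ (by rw [h.1.1]; omega) (by rw [row_len h.1 (r+1) (by omega)]; omega)]
    rw [hval, if_pos (by omega)]
  · rw [g2_ps2_ne _ _ _ _ _ _ hab, h.2 a b ha hb]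
    have hiff : (a ≤ r ∨ (a = r+1 ∧ b ≤ c)) ↔ (a ≤ r ∨ (a = r+1 ∧ b ≤ c+1)) := by omega
    rw [if_congr hiff rfl rfl]

theorem colfold (f : Int → Int → Int) (M N r : Nat) (g : List (List Int)) (hr : r < M)
    (h0 : ColInv (fun p q => f ((p:Int)+1) ((q:Int)+1)) M N r 0 g) (c : Nat) (hc : c ≤ N) :
    ColInv (fun p q => f ((p:Int)+1) ((q:Int)+1)) M N r c
      ((List.range c).foldl (fun g (c' : Nat) => cellStep f g (1+(r:Int)) (1+(c':Int))) g) := by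
  induction c with
  | zero => simpa using h0
  | succ c ih =>
    rw [List.range_succ, List.foldl_append, List.foldl_cons, List.foldl_nil]
    exact colstep f M N r c _ hr (by omega) (ih (by omega))

def RowInv (F : Nat → Nat → Int) (M N r : Nat) (g : List (List Int)) : Prop :=
  GridLen M N g ∧ ∀ a b : Nat, a ≤ M → b ≤ N →
    g2 g a b = if a ≤ r then Ppre F a b else 0

theorem RowInv_to_ColInv (F : Nat → Nat → Int) (M N r : Nat) (g : List (List Int))
    (h : RowInv F M N r g) : ColInv F M N r 0 g := by
  refine ⟨h.1, fun a b ha hb => ?_⟩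
  rw [h.2 a b ha hb]
  by_cases hx : a ≤ r
  · rw [if_pos hx, if_pos (Or.inl hx)]
  · by_cases hy : a = r+1 ∧ b ≤ 0
    · rw [if_neg hx, if_pos (Or.inr hy)]
      have : b = 0 := by omega
      subst this
      simp [Ppre]
    · rw [if_neg hx, if_neg (by tauto)]

theorem ColInv_to_RowInv (F : Nat → Nat → Int) (M N r : Nat) (g : List (List Int))
    (h : ColInv F M N r N g) : RowInv F M N (r+1) g := by
  refine ⟨h.1, fun a b ha hb => ?_⟩
  rw [h.2 a b ha hb]
  exact if_congr (by omega) rfl rfl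

theorem RowInv_init (F : Nat → Nat → Int) (M N : Nat) :
    RowInv F M N 0 (List.replicate (M+1) (List.replicate (N+1) (0:Int))) := by
  constructor
  · constructor
    · simp
    · intro r hr
      rw [List.eq_of_mem_replicate hr]
      simp
  · intro a b ha hb
    have hz : g2 (List.replicate (M+1) (List.replicate (N+1) (0:Int))) a b = 0 := by
      simp [g2, List.getD, List.getElem?_replicate, Nat.lt_succ_of_le ha]
      split <;> simp
    rw [hz]
    by_cases hx : a ≤ 0
    · rw [if_pos hx]
      have : a = 0 := by omega
      subst this
      simp [Ppre]
    · rw [if_neg hx]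

theorem gridBuild_get (f : Int → Int → Int) (M N : Nat) (a b : Nat) (ha : a ≤ M) (hb : b ≤ N) :
    g2 (gridBuild f M N) a b = Ppre (fun p q => f ((p:Int)+1) ((q:Int)+1)) a b := by
  rw [gridBuild_eq]
  have main : ∀ r ≤ M, RowInv (fun p q => f ((p:Int)+1) ((q:Int)+1)) M N r
      ((List.range r).foldl (fun g (t : Nat) =>
        (List.range N).foldl (fun g (c : Nat) => cellStep f g (1+(t:Int)) (1+(c:Int))) g)
        (List.replicate (M+1) (List.replicate (N+1) (0:Int)))) := by
    intro r hrM
    induction r with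
    | zero => simpa using RowInv_init _ M N
    | succ r ih =>
      rw [List.range_succ, List.foldl_append, List.foldl_cons, List.foldl_nil]
      exact ColInv_to_RowInv _ M N r _
        (colfold f M N r _ (by omega) (RowInv_to_ColInv _ M N r _ (ih (by omega))) N le_rfl)
  have := (main M le_rfl).2 a b ha hb
  rw [this, if_pos ha]

-- square "bad count": number of cells below h_ in the s×s square with 1-based top-left (i,j)
def sqB (arr : List (List Int)) (h_ : Int) (i j s : Nat) : Int :=
  rect (flt arr h_) (i-1) (i-1+s) (j-1) (j-1+s)

theorem sqB_mono (arr : List (List Int)) (h_ : Int) (i j s s' : Nat) (hs : s ≤ s') :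
    sqB arr h_ i j s ≤ sqB arr h_ i j s' := by
  exact rect_mono _ (flt_nonneg arr h_) _ _ _ _ _ _ (by omega) (by omega)

-- best feasible side at cell (i,j) among sides 1..t
def Scell (arr : List (List Int)) (h_ kk : Int) (i j t : Nat) : Nat :=
  (((Finset.Icc 1 t).filter (fun s => sqB arr h_ i j s ≤ kk)).max).unbotD 0

theorem Scell_le (arr : List (List Int)) (h_ kk : Int) (i j t : Nat) :
    Scell arr h_ kk i j t ≤ t := by
  unfold Scell
  cases h : ((Finset.Icc 1 t).filter (fun s => sqB arr h_ i j s ≤ kk)).max with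
  | bot => simp
  | coe m =>
    have hm := Finset.mem_of_max h
    simp only [Finset.mem_filter, Finset.mem_Icc] at hm
    simpa [h, WithBot.unbotD_coe] using hm.1.2

theorem Scell_ge (arr : List (List Int)) (h_ kk : Int) (i j t s : Nat)
    (h1 : 1 ≤ s) (h2 : s ≤ t) (h3 : sqB arr h_ i j s ≤ kk) : s ≤ Scell arr h_ kk i j t := by
  have hmem : s ∈ (Finset.Icc 1 t).filter (fun s => sqB arr h_ i j s ≤ kk) := by
    simp [Finset.mem_filter, Finset.mem_Icc, h1, h2, h3]
  have hle := Finset.le_max hmem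
  unfold Scell
  cases h : ((Finset.Icc 1 t).filter (fun s => sqB arr h_ i j s ≤ kk)).max with
  | bot => rw [h] at hle; simp at hle
  | coe m => rw [h] at hle; simpa [WithBot.unbotD_coe] using hle

theorem Scell_feas (arr : List (List Int)) (h_ kk : Int) (i j t : Nat)
    (h : 1 ≤ Scell arr h_ kk i j t) : sqB arr h_ i j (Scell arr h_ kk i j t) ≤ kk := by
  unfold Scell at *
  cases hm : ((Finset.Icc 1 t).filter (fun s => sqB arr h_ i j s ≤ kk)).max with
  | bot => rw [hm] at h; simp at h
  | coe m =>
    have := Finset.mem_of_max hm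
    simp only [Finset.mem_filter] at this
    simpa [hm, WithBot.unbotD_coe] using this.2

theorem Scell_succ_feas (arr : List (List Int)) (h_ kk : Int) (i j t : Nat)
    (h : sqB arr h_ i j (t+1) ≤ kk) : Scell arr h_ kk i j (t+1) = t+1 := by
  have h1 := Scell_le arr h_ kk i j (t+1)
  have h2 := Scell_ge arr h_ kk i j (t+1) (t+1) (by omega) le_rfl h
  omega

theorem Scell_succ_not (arr : List (List Int)) (h_ kk : Int) (i j t : Nat)
    (h : ¬ sqB arr h_ i j (t+1) ≤ kk) : Scell arr h_ kk i j (t+1) = Scell arr h_ kk i j t := by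
  unfold Scell
  rw [← Finset.insert_Icc_right_eq_Icc_add_one (by omega), Finset.filter_insert, if_neg h]

theorem Scell_zero (arr : List (List Int)) (h_ kk : Int) (i j : Nat) :
    Scell arr h_ kk i j 0 = 0 := by
  simp [Scell]

-- canonical per-cell step both ports simulate
def cstep (arr : List (List Int)) (h_ kk : Int) (M N i j : Nat)
    (st : (Int × Int × Int × Int) × Nat) : (Int × Int × Int × Int) × Nat :=
  let lim := min (M - i + 1) (N - j + 1)
  let S := Scell arr h_ kk i j lim
  if st.2 < S then (((i:Int), (j:Int), (i:Int) + S - 1, (j:Int) + S - 1), S) else st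

def cfold (arr : List (List Int)) (h_ kk : Int) (M N : Nat) : (Int × Int × Int × Int) × Nat :=
  (PySem.List.pyRange 1 ((M:Int)+1) 1).foldl (fun st i =>
    (PySem.List.pyRange 1 ((N:Int)+1) 1).foldl (fun st j =>
      cstep arr h_ kk M N i.toNat j.toNat st) st) (((0:Int),(0:Int),(0:Int),(0:Int)), 0)

-- state views
def RA (s : (Int × Int × Int × Int) × Nat) : Int × Int × Int × Int × Int :=
  (s.1.1, s.1.2.1, s.1.2.2.1, s.1.2.2.2, ((s.2 : Nat) : Int)^2)
def RB (s : (Int × Int × Int × Int) × Nat) : (Int × Int × Int × Int) × Int :=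
  (s.1, (s.2 : Int))

theorem foldl_sim {σ τ ι : Type} (R : σ → τ) (f : τ → ι → τ) (g : σ → ι → σ)
    (l : List ι) (s : σ) (h : ∀ x ∈ l, ∀ a, f (R a) x = R (g a x)) :
    l.foldl f (R s) = R (l.foldl g s) := by
  induction l generalizing s with
  | nil => rfl
  | cons x xs ih =>
    simp only [List.foldl_cons]
    rw [h x (by simp) s]
    exact ih _ (fun y hy a => h y (by simp [hy]) a)

-- binary-search specification
theorem pvBS_spec (pre : List (List Int)) (kk i j : Int) : ∀ (fuel : Nat) (lo hi : Int),
    (hi - lo).toNat ≤ fuel → lo ≤ hi → pvBad pre i j lo ≤ kk →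
    (∀ s t : Int, lo ≤ s → s ≤ t → t ≤ hi → pvBad pre i j t ≤ kk → pvBad pre i j s ≤ kk) →
    lo ≤ pvBS pre kk i j lo hi ∧ pvBS pre kk i j lo hi ≤ hi ∧
    pvBad pre i j (pvBS pre kk i j lo hi) ≤ kk ∧
    ∀ s : Int, pvBS pre kk i j lo hi < s → s ≤ hi → ¬ pvBad pre i j s ≤ kk := by
  intro fuel
  induction fuel with
  | zero =>
    intro lo hi hf hle hfeas _
    have : lo = hi := by omega
    subst this
    rw [pvBS, dif_neg (by omega)]
    exact ⟨le_rfl, le_rfl, hfeas, fun s hs1 hs2 => absurd (lt_of_lt_of_le hs1 hs2) (lt_irrefl _)⟩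
  | succ fuel ih =>
    intro lo hi hf hle hfeas hmono
    by_cases hlt : lo < hi
    · have hmid : lo + 1 ≤ PySem.Int.floordiv (lo+hi+1) 2 ∧ PySem.Int.floordiv (lo+hi+1) 2 ≤ hi := by
        rw [PySem.Int.floordiv_eq_ediv_of_pos (by norm_num)]
        omega
      set mid := PySem.Int.floordiv (lo+hi+1) 2 with hmiddef
      rw [pvBS, dif_pos hlt]
      simp only [← hmiddef]
      by_cases hfm : pvBad pre i j mid ≤ kk
      · rw [if_pos hfm]
        have h2 := ih mid hi (by omega) (by omega) hfm
          (fun s t hs hst ht hft => hmono s t (by omega) hst ht hft)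
        exact ⟨by omega, h2.2.1, h2.2.2.1, h2.2.2.2⟩
      · rw [if_neg hfm]
        have h2 := ih lo (mid - 1) (by omega) (by omega) hfeas
          (fun s t hs hst ht hft => hmono s t hs hst (by omega) hft)
        refine ⟨h2.1, by omega, h2.2.2.1, fun s hs1 hs2 => ?_⟩
        by_cases hsm : s ≤ mid - 1
        · exact h2.2.2.2 s hs1 hsm
        · intro hfs
          exact hfm (hmono mid s (by omega) (by omega) hs2 hfs)
    · have : lo = hi := by omega
      subst this
      rw [pvBS, dif_neg (by omega)]
      exact ⟨le_rfl, le_rfl, hfeas, fun s hs1 hs2 => absurd (lt_of_lt_of_le hs1 hs2) (lt_irrefl _)⟩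


-- the concrete indicator functions the two ports feed the grid builder
def fA (arr : List (List Int)) (h_ : Int) : Int → Int → Int := fun i j =>
  if h_ ≤ (arr.getD (i-1).toNat []).getD (j-1).toNat 0 then 1 else 0
def fB (arr : List (List Int)) (h_ : Int) : Int → Int → Int := fun i j =>
  if (arr.getD (i-1).toNat []).getD (j-1).toNat 0 < h_ then 1 else 0

theorem fA_shift (arr : List (List Int)) (h_ : Int) (p q : Nat) :
    fA arr h_ ((p:Int)+1) ((q:Int)+1) = fge arr h_ p q := by
  simp [fA, fge, add_sub_cancel_right]

theorem fB_shift (arr : List (List Int)) (h_ : Int) (p q : Nat) :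
    fB arr h_ ((p:Int)+1) ((q:Int)+1) = flt arr h_ p q := by
  simp [fB, flt, add_sub_cancel_right]

theorem Ppre_congr (F G : Nat → Nat → Int) (h : ∀ a b, F a b = G a b) (i j : Nat) :
    Ppre F i j = Ppre G i j := by
  unfold Ppre
  exact Finset.sum_congr rfl fun a _ => Finset.sum_congr rfl fun b _ => h a b

theorem dpA_g2 (arr : List (List Int)) (h_ : Int) (a b : Nat)
    (ha : a ≤ arr.length) (hb : b ≤ (arr.headD []).length) :
    g2 (gridBuild (fA arr h_) arr.length (arr.headD []).length) a b = Ppre (fge arr h_) a b := by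
  rw [gridBuild_get _ _ _ _ _ ha hb]
  exact Ppre_congr _ _ (fun p q => fA_shift arr h_ p q) a b

theorem preB_g2 (arr : List (List Int)) (h_ : Int) (a b : Nat)
    (ha : a ≤ arr.length) (hb : b ≤ (arr.headD []).length) :
    g2 (gridBuild (fB arr h_) arr.length (arr.headD []).length) a b = Ppre (flt arr h_) a b := by
  rw [gridBuild_get _ _ _ _ _ ha hb]
  exact Ppre_congr _ _ (fun p q => fB_shift arr h_ p q) a b

theorem rect_split (arr : List (List Int)) (h_ : Int) (p q s : Nat) :
    (s:Int)^2 - rect (fge arr h_) p (p+s) q (q+s) = rect (flt arr h_) p (p+s) q (q+s) := by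
  have hadd := rect_add (fge arr h_) (flt arr h_) p (p+s) q (q+s)
  have hone : rect (fun a b => fge arr h_ a b + flt arr h_ a b) p (p+s) q (q+s)
      = rect (fun _ _ => (1:Int)) p (p+s) q (q+s) := by
    unfold rect
    exact Finset.sum_congr rfl fun a _ => Finset.sum_congr rfl fun b _ => fge_add_flt arr h_ a b
  rw [hone, rect_ones] at hadd
  linarith

-- A's inner expression for the below-count of the s×s square at 1-based (i,j)
theorem dp_no_eq (arr : List (List Int)) (h_ : Int) (i j s : Nat)
    (hi1 : 1 ≤ i) (hj1 : 1 ≤ j) (hs : 1 ≤ s)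
    (hiM : i-1+s ≤ arr.length) (hjN : j-1+s ≤ (arr.headD []).length) :
    ((s:Int))^2 - (g2 (gridBuild (fA arr h_) arr.length (arr.headD []).length) (i-1+s) (j-1+s)
      - g2 (gridBuild (fA arr h_) arr.length (arr.headD []).length) (i-1+s) (j-1)
      - g2 (gridBuild (fA arr h_) arr.length (arr.headD []).length) (i-1) (j-1+s)
      + g2 (gridBuild (fA arr h_) arr.length (arr.headD []).length) (i-1) (j-1))
    = sqB arr h_ i j s := by
  rw [dpA_g2 _ _ _ _ hiM hjN, dpA_g2 _ _ _ _ hiM (by omega), dpA_g2 _ _ _ _ (by omega) hjN,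
    dpA_g2 _ _ _ _ (by omega) (by omega)]
  unfold sqB
  rw [rect_eq_Ppre _ _ _ _ _ (by omega) (by omega)]
  have := rect_split arr h_ (i-1) (j-1) s
  rw [rect_eq_Ppre _ _ _ _ _ (by omega) (by omega), rect_eq_Ppre _ _ _ _ _ (by omega) (by omega)] at this
  linarith

-- B's pvBad for the s×s square at 1-based (i,j)
theorem pre_bad_eq (arr : List (List Int)) (h_ : Int) (i j s : Nat)
    (hi1 : 1 ≤ i) (hj1 : 1 ≤ j) (hs : 1 ≤ s)
    (hiM : i-1+s ≤ arr.length) (hjN : j-1+s ≤ (arr.headD []).length) :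
    pvBad (gridBuild (fB arr h_) arr.length (arr.headD []).length) (i:Int) (j:Int) (s:Int)
    = sqB arr h_ i j s := by
  unfold pvBad
  have e1 : (i:Int) + (s:Int) - 1 = ((i-1+s : Nat) : Int) := by omega
  have e2 : (j:Int) + (s:Int) - 1 = ((j-1+s : Nat) : Int) := by omega
  have e3 : (i:Int) - 1 = ((i-1 : Nat) : Int) := by omega
  have e4 : (j:Int) - 1 = ((j-1 : Nat) : Int) := by omega
  rw [e1, e2, e3, e4]
  rw [pvGet2_nat, pvGet2_nat, pvGet2_nat, pvGet2_nat]
  rw [preB_g2 _ _ _ _ hiM hjN, preB_g2 _ _ _ _ hiM (by omega), preB_g2 _ _ _ _ (by omega) hjN,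
    preB_g2 _ _ _ _ (by omega) (by omega)]
  unfold sqB
  rw [rect_eq_Ppre _ _ _ _ _ (by omega) (by omega)]


theorem sq_cast_le (a b : Nat) : ((a:Int))^2 ≤ ((b:Int))^2 ↔ a ≤ b := by
  rw [← Nat.cast_pow, ← Nat.cast_pow, Nat.cast_le]
  exact Nat.pow_le_pow_iff_left (by norm_num)

theorem A_cell (arr : List (List Int)) (h_ kk : Int) (i j : Nat)
    (hi1 : 1 ≤ i) (hiM : i ≤ arr.length) (hj1 : 1 ≤ j) (hjN : j ≤ (arr.headD []).length)
    (st : (Int × Int × Int × Int) × Nat) :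
    (PySem.List.pyRange 0 (min ((arr.length:Int)+1-(i:Int)) (((arr.headD []).length:Int)+1-(j:Int))) 1).foldl
      (fun s k =>
        let v := pvGet2 (gridBuild (fA arr h_) arr.length (arr.headD []).length) ((i:Int)+k) ((j:Int)+k)
          - pvGet2 (gridBuild (fA arr h_) arr.length (arr.headD []).length) ((i:Int)+k) ((j:Int)-1)
          - pvGet2 (gridBuild (fA arr h_) arr.length (arr.headD []).length) ((i:Int)-1) ((j:Int)+k)
          + pvGet2 (gridBuild (fA arr h_) arr.length (arr.headD []).length) ((i:Int)-1) ((j:Int)-1)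
        let no := (k+1)^2 - v
        if no > kk then s
        else if s.2.2.2.2 ≥ (k+1)^2 then s
        else ((i:Int), (j:Int), (i:Int)+k, (j:Int)+k, (k+1)^2)) (RA st)
    = RA (cstep arr h_ kk arr.length (arr.headD []).length i j st) := by
  set M := arr.length with hM
  set N := (arr.headD []).length with hN
  set lim := min (M - i + 1) (N - j + 1) with hlim
  have hlim1 : 1 ≤ lim := by omega
  have hlimM : i - 1 + lim ≤ M := by omega
  have hlimN : j - 1 + lim ≤ N := by omega
  have hminZ : min ((M:Int)+1-(i:Int)) ((N:Int)+1-(j:Int)) = ((lim : Nat) : Int) := by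
    rw [hlim]; push_cast; omega
  rw [hminZ, PySem.List.pyRange_one]
  simp only [sub_zero, Int.toNat_natCast, zero_add, List.foldl_map]
  have aux : ∀ t, t ≤ lim → (List.range t).foldl
      (fun s (k : Nat) =>
        let v := pvGet2 (gridBuild (fA arr h_) M N) ((i:Int)+(k:Int)) ((j:Int)+(k:Int))
          - pvGet2 (gridBuild (fA arr h_) M N) ((i:Int)+(k:Int)) ((j:Int)-1)
          - pvGet2 (gridBuild (fA arr h_) M N) ((i:Int)-1) ((j:Int)+(k:Int))
          + pvGet2 (gridBuild (fA arr h_) M N) ((i:Int)-1) ((j:Int)-1)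
        let no := ((k:Int)+1)^2 - v
        if no > kk then s
        else if s.2.2.2.2 ≥ ((k:Int)+1)^2 then s
        else ((i:Int), (j:Int), (i:Int)+(k:Int), (j:Int)+(k:Int), ((k:Int)+1)^2)) (RA st)
      = RA (if st.2 < Scell arr h_ kk i j t
            then (((i:Int), (j:Int), (i:Int)+(Scell arr h_ kk i j t : Nat)-1,
                   (j:Int)+(Scell arr h_ kk i j t : Nat)-1), Scell arr h_ kk i j t)
            else st) := by
    intro t
    induction t with
    | zero =>
      intro _
      rw [Scell_zero]
      simp
    | succ t ih =>
      intro htlim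
      rw [List.range_succ, List.foldl_append, List.foldl_cons, List.foldl_nil, ih (by omega)]
      have hb1 : (i:Int) + (t:Int) = ((i-1+(t+1) : Nat) : Int) := by omega
      have hb2 : (j:Int) + (t:Int) = ((j-1+(t+1) : Nat) : Int) := by omega
      have hb3 : (i:Int) - 1 = ((i-1 : Nat) : Int) := by omega
      have hb4 : (j:Int) - 1 = ((j-1 : Nat) : Int) := by omega
      have hsq : ((t:Int)+1) = (((t+1 : Nat)) : Int) := by omega
      simp only [hb1, hb2, hb3, hb4, hsq, pvGet2_nat]
      have hno := dp_no_eq arr h_ i j (t+1) hi1 hj1 (by omega) (by omega) (by omega)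
      rw [← hM, ← hN] at hno
      set S := Scell arr h_ kk i j t with hS
      have hSle : S ≤ t := Scell_le arr h_ kk i j t
      by_cases hfeas : sqB arr h_ i j (t+1) ≤ kk
      · have hSucc : Scell arr h_ kk i j (t+1) = t+1 := Scell_succ_feas arr h_ kk i j t hfeas
        rw [if_neg (by rw [hno]; omega)]
        by_cases hx : st.2 < S
        · -- current state is the in-cell update at side S ≤ t < t+1: always beaten
          rw [if_pos hx]
          rw [if_neg (by
            simp only [RA]
            rw [ge_iff_le, sq_cast_le]
            omega)]
          rw [hSucc, if_pos (by omega)]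
          simp only [RA, Prod.mk.injEq]
          and_intros <;> first | trivial | omega
        · rw [if_neg hx]
          by_cases hy : t+1 ≤ st.2
          · rw [if_pos (by
              simp only [RA]
              rw [ge_iff_le, sq_cast_le]
              omega)]
            rw [hSucc, if_neg (by omega)]
          · rw [if_neg (by
              simp only [RA]
              rw [ge_iff_le, sq_cast_le]
              omega)]
            rw [hSucc, if_pos (by omega)]
            simp only [RA, Prod.mk.injEq]
            and_intros <;> first | trivial | omega
      · have hSucc : Scell arr h_ kk i j (t+1) = S := Scell_succ_not arr h_ kk i j t hfeas
        rw [if_pos (by rw [hno]; omega), hSucc]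
  have haux := aux lim le_rfl
  rw [haux]
  rfl

theorem B_cell (arr : List (List Int)) (h_ kk : Int) (i j : Nat)
    (hi1 : 1 ≤ i) (hiM : i ≤ arr.length) (hj1 : 1 ≤ j) (hjN : j ≤ (arr.headD []).length)
    (st : (Int × Int × Int × Int) × Nat) :
    (let lim := min ((arr.length:Int)-(i:Int)+1) (((arr.headD []).length:Int)-(j:Int)+1)
     if lim ≤ (RB st).2 then RB st
     else if pvBad (gridBuild (fB arr h_) arr.length (arr.headD []).length) (i:Int) (j:Int) ((RB st).2+1) > kk then RB st
     else
       let lo := pvBS (gridBuild (fB arr h_) arr.length (arr.headD []).length) kk (i:Int) (j:Int) ((RB st).2+1) lim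
       (((i:Int), (j:Int), (i:Int)+lo-1, (j:Int)+lo-1), lo))
    = RB (cstep arr h_ kk arr.length (arr.headD []).length i j st) := by
  set M := arr.length with hM
  set N := (arr.headD []).length with hN
  set lim := min (M - i + 1) (N - j + 1) with hlim
  have hlim1 : 1 ≤ lim := by omega
  have hminZ : min ((M:Int)-(i:Int)+1) ((N:Int)-(j:Int)+1) = ((lim : Nat) : Int) := by
    rw [hlim]; push_cast; omega
  simp only [hminZ, RB]
  set PRE := gridBuild (fB arr h_) M N with hPRE
  set S := Scell arr h_ kk i j lim with hS
  have hSle : S ≤ lim := Scell_le arr h_ kk i j lim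
  -- a helper: pvBad at an Int side s with 1 ≤ s ≤ lim is the square's below-count
  have hbad : ∀ s : Int, 1 ≤ s → s ≤ (lim:Int) → pvBad PRE (i:Int) (j:Int) s = sqB arr h_ i j s.toNat := by
    intro s hs1 hs2
    have : s = ((s.toNat : Nat) : Int) := by omega
    rw [this]
    exact pre_bad_eq arr h_ i j s.toNat hi1 hj1 (by omega) (by omega) (by omega)
  by_cases h1 : (lim:Int) ≤ (st.2 : Int)
  · rw [if_pos h1]
    simp only [cstep]
    rw [← hS]
    rw [if_neg (by omega)]
  · rw [if_neg h1]
    have hst2 : st.2 + 1 ≤ lim := by omega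
    have hcast : ((st.2:Int)+1) = ((st.2+1 : Nat) : Int) := by omega
    by_cases h2 : pvBad PRE (i:Int) (j:Int) ((st.2:Int)+1) > kk
    · rw [if_pos h2]
      rw [hcast, pre_bad_eq arr h_ i j (st.2+1) hi1 hj1 (by omega) (by omega) (by omega)] at h2
      -- side st.2+1 is infeasible, so no side > st.2 is feasible: the cell cannot beat st.2
      have hSst : S ≤ st.2 := by
        by_contra hc
        have hS1 : 1 ≤ S := by omega
        have := Scell_feas arr h_ kk i j lim (by omega)
        have hmono := sqB_mono arr h_ i j (st.2+1) S (by omega)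
        rw [← hS] at this
        omega
      simp only [cstep]
      rw [← hS]
      rw [if_neg (by omega)]
    · rw [if_neg h2]
      rw [not_lt] at h2
      rw [hcast, pre_bad_eq arr h_ i j (st.2+1) hi1 hj1 (by omega) (by omega) (by omega)] at h2
      have hspec := pvBS_spec PRE kk (i:Int) (j:Int) (((lim:Int) - ((st.2:Int)+1)).toNat)
        ((st.2:Int)+1) (lim:Int) le_rfl (by omega)
        (by rw [hcast]; rw [pre_bad_eq arr h_ i j (st.2+1) hi1 hj1 (by omega) (by omega) (by omega)]; exact h2)
        (by
          intro s t hs hst ht hft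
          rw [hbad s (by omega) (by omega)]
          rw [hbad t (by omega) (by omega)] at hft
          exact le_trans (sqB_mono arr h_ i j s.toNat t.toNat (by omega)) hft)
      obtain ⟨hr1, hr2, hr3, hr4⟩ := hspec
      set r := pvBS PRE kk (i:Int) (j:Int) ((st.2:Int)+1) (lim:Int) with hr
      have hrS : r = ((S : Nat) : Int) := by
        have hfr : sqB arr h_ i j r.toNat ≤ kk := by
          rw [← hbad r (by omega) (by omega)]; exact hr3
        have hge : r.toNat ≤ S := by
          by_contra hc
          have hS1 : 1 ≤ S ∨ S = 0 := by omega
          -- S is the max feasible side in [1, lim]; r.toNat is feasible and ≤ lim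
          have := Scell_ge arr h_ kk i j lim r.toNat (by omega) (by omega) hfr
          rw [← hS] at this
          omega
        have hle : (S:Int) ≤ r := by
          rcases Nat.eq_zero_or_pos S with h0 | hpos
          · omega
          · by_contra hc
            rw [not_le] at hc
            have hfS := Scell_feas arr h_ kk i j lim (by omega)
            rw [← hS] at hfS
            have := hr4 ((S:Int)) (by omega) (by omega)
            rw [hbad ((S:Int)) (by omega) (by omega)] at this
            simp only [Int.toNat_natCast] at this
            exact this hfS
        omega
      -- the cell beats st.2: S ≥ st.2 + 1
      have hbeat : st.2 < S := by
        have := Scell_ge arr h_ kk i j lim (st.2+1) (by omega) (by omega) h2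
        rw [← hS] at this
        omega
      simp only [cstep]
      rw [← hS]
      rw [if_pos (by omega : st.2 < S)]
      simp only [hrS]

theorem Abuild_eq (arr : List (List Int)) (h_ : Int) :
    ((PySem.List.pyRange 1 ((arr.length:Int)+1) 1).foldl (fun dp i =>
      (PySem.List.pyRange 1 (((arr.headD []).length:Int)+1) 1).foldl (fun dp j =>
        if (arr.getD (i-1).toNat []).getD (j-1).toNat 0 ≥ h_ then
          pvSet2 dp i j (pvGet2 dp i (j-1) + pvGet2 dp (i-1) j - pvGet2 dp (i-1) (j-1) + 1)
        else
          pvSet2 dp i j (pvGet2 dp i (j-1) + pvGet2 dp (i-1) j - pvGet2 dp (i-1) (j-1))) dp)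
      (List.replicate ((arr.length:Int)+1).toNat (List.replicate (((arr.headD []).length:Int)+1).toNat 0)))
    = gridBuild (fA arr h_) arr.length (arr.headD []).length := by
  unfold gridBuild
  have e1 : ((arr.length:Int)+1).toNat = arr.length + 1 := by omega
  have e2 : (((arr.headD []).length:Int)+1).toNat = (arr.headD []).length + 1 := by omega
  rw [e1, e2]
  congr 1
  funext dp i
  congr 1
  funext g j
  simp only [fA]
  by_cases hc : h_ ≤ (arr.getD (i-1).toNat []).getD (j-1).toNat 0
  · rw [if_pos hc, if_pos hc]
  · rw [if_neg hc, if_neg hc, add_zero]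

theorem Bbuild_eq (arr : List (List Int)) (h_ : Int) :
    ((PySem.List.pyRange 1 ((arr.length:Int)+1) 1).foldl (fun g i =>
      (PySem.List.pyRange 1 (((arr.headD []).length:Int)+1) 1).foldl (fun g j =>
        pvSet2 g i j (pvGet2 g i (j-1) + pvGet2 g (i-1) j - pvGet2 g (i-1) (j-1) +
          (if (arr.getD (i-1).toNat []).getD (j-1).toNat 0 < h_ then 1 else 0))) g)
      (List.replicate ((arr.length:Int)+1).toNat (List.replicate (((arr.headD []).length:Int)+1).toNat 0)))
    = gridBuild (fB arr h_) arr.length (arr.headD []).length := by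
  unfold gridBuild fB
  have e1 : ((arr.length:Int)+1).toNat = arr.length + 1 := by omega
  have e2 : (((arr.headD []).length:Int)+1).toNat = (arr.headD []).length + 1 := by omega
  rw [e1, e2]

theorem A_fold (arr : List (List Int)) (h_ kk : Int) :
    (PySem.List.pyRange 1 ((arr.length:Int)+1) 1).foldl (fun st i =>
      (PySem.List.pyRange 1 (((arr.headD []).length:Int)+1) 1).foldl (fun st j =>
        (PySem.List.pyRange 0 (min ((arr.length:Int)+1-i) (((arr.headD []).length:Int)+1-j)) 1).foldl (fun st k =>
          let v := pvGet2 (gridBuild (fA arr h_) arr.length (arr.headD []).length) (i+k) (j+k)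
            - pvGet2 (gridBuild (fA arr h_) arr.length (arr.headD []).length) (i+k) (j-1)
            - pvGet2 (gridBuild (fA arr h_) arr.length (arr.headD []).length) (i-1) (j+k)
            + pvGet2 (gridBuild (fA arr h_) arr.length (arr.headD []).length) (i-1) (j-1)
          let no := (k+1)^2 - v
          if no > kk then st
          else if st.2.2.2.2 ≥ (k+1)^2 then st
          else (i, j, i+k, j+k, (k+1)^2)) st) st)
      (RA (((0:Int),(0:Int),(0:Int),(0:Int)), (0:Nat)))
    = RA (cfold arr h_ kk arr.length (arr.headD []).length) := by
  unfold cfold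
  apply foldl_sim
  intro x hx a
  rw [PySem.List.mem_pyRange_one] at hx
  have hxe : x = ((x.toNat : Nat) : Int) := by omega
  rw [hxe]
  simp only [Int.toNat_natCast]
  apply foldl_sim
  intro y hy b
  rw [PySem.List.mem_pyRange_one] at hy
  have hye : y = ((y.toNat : Nat) : Int) := by omega
  rw [hye]
  simp only [Int.toNat_natCast]
  exact A_cell arr h_ kk x.toNat y.toNat (by omega) (by omega) (by omega) (by omega) b

theorem B_fold (arr : List (List Int)) (h_ kk : Int) :
    (PySem.List.pyRange 1 ((arr.length:Int)+1) 1).foldl (fun st i =>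
      (PySem.List.pyRange 1 (((arr.headD []).length:Int)+1) 1).foldl (fun st j =>
        let lim := min ((arr.length:Int)-i+1) (((arr.headD []).length:Int)-j+1)
        if lim ≤ st.2 then st
        else if pvBad (gridBuild (fB arr h_) arr.length (arr.headD []).length) i j (st.2+1) > kk then st
        else
          let lo := pvBS (gridBuild (fB arr h_) arr.length (arr.headD []).length) kk i j (st.2+1) lim
          ((i, j, i+lo-1, j+lo-1), lo)) st)
      (RB (((0:Int),(0:Int),(0:Int),(0:Int)), (0:Nat)))
    = RB (cfold arr h_ kk arr.length (arr.headD []).length) := by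
  unfold cfold
  apply foldl_sim
  intro x hx a
  rw [PySem.List.mem_pyRange_one] at hx
  have hxe : x = ((x.toNat : Nat) : Int) := by omega
  rw [hxe]
  simp only [Int.toNat_natCast]
  apply foldl_sim
  intro y hy b
  rw [PySem.List.mem_pyRange_one] at hy
  have hye : y = ((y.toNat : Nat) : Int) := by omega
  rw [hye]
  simp only [Int.toNat_natCast]
  exact B_cell arr h_ kk x.toNat y.toNat (by omega) (by omega) (by omega) (by omega) b
-- ===== VERDICT (by name: the statement is the Claim_ definition above) =====
theorem task7a_spec : Claim_equal_task7a := by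
  intro arr h_ kk _ _
  unfold Spec_task7a
  show task7a arr h_ kk = task7a_alt arr h_ kk
  simp only [task7a, task7a_alt]
  rw [Abuild_eq arr h_, Bbuild_eq arr h_]
  have hra : (((0:Int),(0:Int),(0:Int),(0:Int),(0:Int)) : Int × Int × Int × Int × Int)
      = RA (((0:Int),(0:Int),(0:Int),(0:Int)), (0:Nat)) := by
    simp [RA]
  have hrb : ((((0:Int),(0:Int),(0:Int),(0:Int)), (0:Int)) : (Int × Int × Int × Int) × Int)
      = RB (((0:Int),(0:Int),(0:Int),(0:Int)), (0:Nat)) := by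
    simp [RB]
  rw [hra, hrb, A_fold arr h_ kk, B_fold arr h_ kk]
  rfl
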